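-- pv_equiv track=rewrite | github.com/lhaislla/PAA | Custo-Lista1/corte_haste_custo_fixo.py | Extended_Bottom_Up_Cut_Rod
-- ===== SOURCE A (Python) =====
-- def Extended_Bottom_Up_Cut_Rod(p, n, c):
--     R = [0] * (n + 1) #R e S armazenam receitas máximas e cortes ótimos
--     S = [0] * (n + 1)
--     for j in range(1, n + 1):
--         q = float('-inf')
--         for i in range(1, j + 1):
--             if q < p[i] + R[j - i] - c:
--                 q = p[i] + R[j - i] - c
--                 S[j] = i
--         R[j] = q
--     return R, S
-- ===== SOURCE B (Python) =====
-- def Extended_Bottom_Up_Cut_Rod(p, n, c):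
--     # Forward ("push") dynamic programming: instead of each length j pulling
--     # max(p[i] + R[j-i] - c) from shorter lengths, each solved length j pushes
--     # a relaxation R[j] + p[i] - c to every longer length j + i.  Cells start
--     # as None (unknown); accepting on >= under the descending-piece arrival
--     # order reproduces A's smallest-piece tie-break.
--     R = [None] * (n + 1)
--     S = [0] * (n + 1)
--     if n >= 0:
--         R[0] = 0
--     for j in range(0, n):
--         base = R[j] - c
--         for i in range(1, n - j + 1):
--             v = base + p[i]
--             if R[j + i] is None or v >= R[j + i]:
--                 R[j + i] = v
--                 S[j + i] = i
--     return R, S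
-- ===== Notes on version B (the rewrite author's own statement) =====
-- stated objective: alternative
-- what changed: Replaces A's pull-style DP (each length j scans i=1..j taking max of p[i]+R[j-i]-c with a -inf accumulator and strict-< first-index tie-break) by a forward/push relaxation DP: cells start as None, and each already-solved length j relaxes every longer cell j+i with R[j]+p[i]-c, accepting on >=, which under the descending-piece arrival order yields the same values and the same smallest-piece S entries.
import Mathlib
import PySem

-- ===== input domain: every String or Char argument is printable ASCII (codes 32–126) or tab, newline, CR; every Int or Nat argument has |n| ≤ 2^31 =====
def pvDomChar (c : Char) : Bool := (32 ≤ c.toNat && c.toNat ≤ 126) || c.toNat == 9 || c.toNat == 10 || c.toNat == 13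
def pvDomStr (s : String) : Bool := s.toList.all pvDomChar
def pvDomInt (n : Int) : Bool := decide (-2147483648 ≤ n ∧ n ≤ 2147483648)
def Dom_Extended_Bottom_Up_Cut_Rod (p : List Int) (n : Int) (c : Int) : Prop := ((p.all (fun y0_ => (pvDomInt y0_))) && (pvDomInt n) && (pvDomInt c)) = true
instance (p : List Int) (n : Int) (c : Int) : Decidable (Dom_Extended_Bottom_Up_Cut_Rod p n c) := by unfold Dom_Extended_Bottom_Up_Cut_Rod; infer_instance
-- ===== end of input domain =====

-- B replaces A's pull-style DP (each j takes the max of p[i]+R[j-i]-c) by a forward/push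
-- relaxation DP (each solved j relaxes every longer cell j+i); same values, same tie-breaks.

-- ===== PORT A =====
-- 'q < v' where q is float('-inf') or an int: -inf compares below every int
def pyLtNegInf : Option Int → Int → Bool
  | none, _ => true
  | some q, v => decide (q < v)

def Extended_Bottom_Up_Cut_Rod (p : List Int) (n : Int) (c : Int) : List Int × List Int :=
  -- R = [0]*(n+1); S = [0]*(n+1)  (empty for n < 0, as in Python)
  let R : List Int := List.replicate (n + 1).toNat 0
  let S : List Int := List.replicate (n + 1).toNat 0
  (PySem.List.pyRange 1 (n + 1) 1).foldl
    (fun (RS : List Int × List Int) j =>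
      -- q = float('-inf') is 'none'; p[i] is in range under Pre_ (Python raises IndexError outside), R[j-i] always in range
      let inner := (PySem.List.pyRange 1 (j + 1) 1).foldl
        (fun (qS : Option Int × List Int) i =>
          if pyLtNegInf qS.1 (PySem.List.pyGetD p i 0 + PySem.List.pyGetD RS.1 (j - i) 0 - c)
          then (some (PySem.List.pyGetD p i 0 + PySem.List.pyGetD RS.1 (j - i) 0 - c),
                PySem.List.pySetD qS.2 j i)
          else qS)
        (none, RS.2)
      -- R[j] = q : the inner loop is nonempty (j ≥ 1), so inner.1 is 'some'; the default 0 is unreachable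
      (PySem.List.pySetD RS.1 j (inner.1.getD 0), inner.2))
    (R, S)

-- ===== PORT B =====
-- 'R[t] is None or v >= R[t]' on the Option-valued cell
def pyGeOpt : Int → Option Int → Bool
  | _, none => true
  | v, some q => decide (q ≤ v)

def Extended_Bottom_Up_Cut_Rod_alt (p : List Int) (n : Int) (c : Int) : List Int × List Int :=
  -- R = [None]*(n+1); S = [0]*(n+1); if n >= 0: R[0] = 0
  let R : List (Option Int) := List.replicate (n + 1).toNat none
  let S : List Int := List.replicate (n + 1).toNat 0
  let R := if 0 ≤ n then PySem.List.pySetD R 0 (some 0) else R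
  let RS := (PySem.List.pyRange 0 n 1).foldl
    (fun (RS : List (Option Int) × List Int) j =>
      -- base = R[j] - c : cell j is always filled here, so '.getD 0' is unreachable
      let base := (PySem.List.pyGetD RS.1 j none).getD 0 - c
      (PySem.List.pyRange 1 (n - j + 1) 1).foldl
        (fun (RS : List (Option Int) × List Int) i =>
          let v := base + PySem.List.pyGetD p i 0
          if pyGeOpt v (PySem.List.pyGetD RS.1 (j + i) none)
          then (PySem.List.pySetD RS.1 (j + i) (some v), PySem.List.pySetD RS.2 (j + i) i)
          else RS)
        RS)
    (R, S)
  -- python returns R itself, which holds ints everywhere by then; the port unwraps the Option cells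
  (RS.1.map (fun o => o.getD 0), RS.2)

-- ===== PRECONDITION & SPEC =====
-- Pre_ excludes exactly the inputs where Python A raises IndexError: for n ≥ 1 it reads p[1..n], so len(p) ≥ n+1 is needed (for n ≤ 0 no element is read).
def Pre_Extended_Bottom_Up_Cut_Rod (p : List Int) (n : Int) (c : Int) : Prop :=
  1 ≤ n → n < (p.length : Int)
instance (p : List Int) (n : Int) (c : Int) : Decidable (Pre_Extended_Bottom_Up_Cut_Rod p n c) := by
  unfold Pre_Extended_Bottom_Up_Cut_Rod; infer_instance

def pvWitness_Extended_Bottom_Up_Cut_Rod : List Int × Int × Int := ([0, 1, 5], 2, 1)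

def Spec_Extended_Bottom_Up_Cut_Rod (p : List Int) (n : Int) (c : Int) (out : List Int × List Int) : Prop := out = Extended_Bottom_Up_Cut_Rod_alt p n c
instance (p : List Int) (n : Int) (c : Int) (out : List Int × List Int) : Decidable (Spec_Extended_Bottom_Up_Cut_Rod p n c out) := by unfold Spec_Extended_Bottom_Up_Cut_Rod; infer_instance

-- ===== CLAIM (what is proved, stated in full; the proofs are below) =====
def Claim_equal_Extended_Bottom_Up_Cut_Rod : Prop := ∀ (p : List Int) (n : Int) (c : Int), Dom_Extended_Bottom_Up_Cut_Rod p n c → Pre_Extended_Bottom_Up_Cut_Rod p n c → Spec_Extended_Bottom_Up_Cut_Rod p n c (Extended_Bottom_Up_Cut_Rod p n c)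

-- ===== LEMMAS AND PROOFS =====

-- candidate value: revenue of a first piece of length i cut from a rod of length t,
-- given the table R of solved values
def pvCand (p : List Int) (c : Int) (R : List Int) (t i : Nat) : Int :=
  PySem.List.pyGetD p (i : Int) 0 + PySem.List.pyGetD R ((t : Int) - (i : Int)) 0 - c

-- A's inner accumulator on the (q, s) pair only (pull style, strict <)
def pvPull (f : Nat → Int) (l : List Nat) (qs : Option Int × Int) : Option Int × Int :=
  l.foldl (fun qs i => if pyLtNegInf qs.1 (f i) then (some (f i), (i : Int)) else qs) qs

-- B's per-cell update sequence (push style, ≥ accept)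
def pvPush (f : Nat → Int) (l : List Nat) (qs : Option Int × Int) : Option Int × Int :=
  l.foldl (fun qs i => if pyGeOpt (f i) qs.1 then (some (f i), (i : Int)) else qs) qs

def pvMax (f : Nat → Int) (q : Int) (l : List Nat) : Int :=
  l.foldl (fun a i => max a (f i)) q

-- the reference table: entry t is the pull over i = 1..t
def pvTab (p : List Int) (c : Int) : Nat → List Int × List Int
  | 0 => ([0], [0])
  | t + 1 =>
    let T := pvTab p c t
    let qs := pvPull (pvCand p c T.1 (t + 1)) (List.range' 1 (t + 1)) (none, 0)
    (T.1 ++ [qs.1.getD 0], T.2 ++ [qs.2])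

-- arrival list of cell t after the first m outer iterations of B (pieces in descending order)
def pvCellIdx (t m : Nat) : List Nat := (List.range (min m t)).map (fun j' => t - j')

-- B's state after m outer iterations, described cellwise
def pvBR (p : List Int) (c : Int) (N m : Nat) : List (Option Int) :=
  (List.range (N + 1)).map (fun t =>
    if t = 0 then some 0
    else (pvPush (pvCand p c (pvTab p c N).1 t) (pvCellIdx t m) (none, 0)).1)

def pvBS (p : List Int) (c : Int) (N m : Nat) : List Int :=
  (List.range (N + 1)).map (fun t =>
    (pvPush (pvCand p c (pvTab p c N).1 t) (pvCellIdx t m) (none, 0)).2)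

-- ---- generic small lemmas ----

theorem pvMax_eq_foldl_map (f : Nat → Int) (q : Int) (l : List Nat) :
    pvMax f q l = (l.map f).foldl max q := by
  simp [pvMax, List.foldl_map]

theorem pvMax_le (f : Nat → Int) (q : Int) (l : List Nat) :
    q ≤ pvMax f q l ∧ ∀ i ∈ l, f i ≤ pvMax f q l := by
  simpa [pvMax] using PySem.List.le_foldl_max_int l f q

theorem pvMax_attained (f : Nat → Int) (q : Int) (l : List Nat) :
    pvMax f q l = q ∨ ∃ i ∈ l, pvMax f q l = f i := by
  rw [pvMax_eq_foldl_map]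
  rcases PySem.List.foldl_max_mem (l.map f) q with h | h
  · exact Or.inl h
  · rcases List.mem_map.1 h with ⟨i, hi, hfi⟩
    exact Or.inr ⟨i, hi, hfi.symm⟩

theorem pvPull_cons (f : Nat → Int) (a : Nat) (l : List Nat) (qs : Option Int × Int) :
    pvPull f (a :: l) qs
      = pvPull f l (if pyLtNegInf qs.1 (f a) then (some (f a), (a : Int)) else qs) := rfl

theorem pvPush_cons (f : Nat → Int) (a : Nat) (l : List Nat) (qs : Option Int × Int) :
    pvPush f (a :: l) qs
      = pvPush f l (if pyGeOpt (f a) qs.1 then (some (f a), (a : Int)) else qs) := rfl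

theorem pvPush_append (f : Nat → Int) (l₁ l₂ : List Nat) (qs : Option Int × Int) :
    pvPush f (l₁ ++ l₂) qs = pvPush f l₂ (pvPush f l₁ qs) := by
  simp [pvPush, List.foldl_append]

theorem pvPull_congr (f g : Nat → Int) (l : List Nat) (qs : Option Int × Int)
    (h : ∀ i ∈ l, f i = g i) : pvPull f l qs = pvPull g l qs := by
  induction l generalizing qs with
  | nil => rfl
  | cons a l ih =>
      rw [pvPull_cons, pvPull_cons, h a (List.mem_cons_self), ih _ (fun i hi => h i (List.mem_cons_of_mem _ hi))]

-- pull characterisation: running strict max = (max, first index attaining it)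
theorem pvPull_char (f : Nat → Int) :
    ∀ (l : List Nat) (q s : Int),
      pvPull f l (some q, s)
        = (some (pvMax f q l),
           if q < pvMax f q l
           then (((l.find? (fun i => decide (f i = pvMax f q l))).getD 0 : Nat) : Int)
           else s) := by
  intro l
  induction l with
  | nil => intro q s; simp [pvPull, pvMax]
  | cons a l ih =>
      intro q s
      rw [pvPull_cons]
      by_cases h : q < f a
      · have hM : pvMax f q (a :: l) = pvMax f (f a) l := by
          simp [pvMax, max_eq_right (le_of_lt h)]
        have hcond : pyLtNegInf (some q) (f a) = true := by simp [pyLtNegInf, h]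
        simp only [hcond, if_true]
        rw [ih (f a) (a : Int), hM]
        have hfa_le : f a ≤ pvMax f (f a) l := (pvMax_le f (f a) l).1
        rw [if_pos (by omega : q < pvMax f (f a) l)]
        by_cases hfaM : f a = pvMax f (f a) l
        · rw [if_neg (by omega),
            List.find?_cons_of_pos (p := fun i => decide (f i = pvMax f (f a) l)) (by simpa using hfaM)]
          simp
        · rw [if_pos (by omega), List.find?_cons_of_neg (by simpa using hfaM)]
      · have hM : pvMax f q (a :: l) = pvMax f q l := by
          simp [pvMax, max_eq_left (by omega : f a ≤ q)]
        have hcond : pyLtNegInf (some q) (f a) = false := by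
          simp only [pyLtNegInf, decide_eq_false_iff_not]; omega
        simp only [hcond, Bool.false_eq_true, if_false]
        rw [ih q s, hM]
        by_cases hq : q < pvMax f q l
        · rw [if_pos hq, if_pos hq,
            List.find?_cons_of_neg (by simp only [decide_eq_true_eq]; omega)]
        · rw [if_neg hq, if_neg hq]

-- push characterisation: running ≥ max = (max, last index attaining it, else the seed)
theorem pvPush_char (f : Nat → Int) :
    ∀ (l : List Nat) (q s : Int),
      pvPush f l (some q, s)
        = (some (pvMax f q l),
           match l.reverse.find? (fun i => decide (f i = pvMax f q l)) with
           | some i => (i : Int)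
           | none => s) := by
  intro l
  induction l with
  | nil => intro q s; simp [pvPush, pvMax]
  | cons a l ih =>
      intro q s
      rw [pvPush_cons]
      by_cases h : q ≤ f a
      · have hM : pvMax f q (a :: l) = pvMax f (f a) l := by
          simp [pvMax, max_eq_right h]
        have hcond : pyGeOpt (f a) (some q) = true := by simp [pyGeOpt, h]
        simp only [hcond, if_true]
        rw [ih (f a) (a : Int), hM]
        rw [List.reverse_cons, List.find?_append]
        cases hfind : l.reverse.find? (fun i => decide (f i = pvMax f (f a) l)) with
        | some j => simp
        | none =>
            have hfa : f a = pvMax f (f a) l := by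
              rcases pvMax_attained f (f a) l with h1 | ⟨i, hi, hv⟩
              · exact h1.symm
              · exact absurd (by simp [hv.symm] :
                  (fun i => decide (f i = pvMax f (f a) l)) i = true)
                  ((List.find?_eq_none.1 hfind) i (List.mem_reverse.2 hi))
            rw [List.find?_cons_of_pos (p := fun i => decide (f i = pvMax f (f a) l)) (by simpa using hfa)]
            simp
      · have hM : pvMax f q (a :: l) = pvMax f q l := by
          simp [pvMax, max_eq_left (by omega : f a ≤ q)]
        have hcond : pyGeOpt (f a) (some q) = false := by
          simp only [pyGeOpt, decide_eq_false_iff_not]; omega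
        simp only [hcond, Bool.false_eq_true, if_false]
        rw [ih q s, hM]
        rw [List.reverse_cons, List.find?_append]
        cases hfind : l.reverse.find? (fun i => decide (f i = pvMax f q l)) with
        | some j => simp
        | none =>
            have hq : q ≤ pvMax f q l := (pvMax_le f q l).1
            have hfa2 : ¬ (f a = pvMax f q l) := by omega
            rw [List.find?_cons_of_neg (p := fun i => decide (f i = pvMax f q l)) (by simpa using hfa2)]
            simp [List.find?]

-- the core agreement: pushing pieces in descending order with ≥ equals pulling ascending with <
theorem pvStar (f : Nat → Int) (k : Nat) :
    pvPush f (List.range' 1 (k + 1)).reverse (none, 0)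
      = pvPull f (List.range' 1 (k + 1)) (none, 0) := by
  have e1 : List.range' 1 (k + 1) = 1 :: List.range' 2 k := List.range'_succ
  have e2 : List.range' 1 (k + 1) = List.range' 1 k ++ [k + 1] := by
    simpa [Nat.add_comm] using (List.range'_concat (step := 1) (s := 1) (n := k))
  rw [show pvPull f (List.range' 1 (k + 1)) (none, 0)
        = pvPull f (List.range' 2 k) (some (f 1), ((1 : Nat) : Int)) from by
      rw [e1, pvPull_cons]; simp [pyLtNegInf]]
  rw [show pvPush f (List.range' 1 (k + 1)).reverse (none, 0)
        = pvPush f (List.range' 1 k).reverse (some (f (k + 1)), ((k + 1 : Nat) : Int)) from by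
      rw [e2, List.reverse_append, List.reverse_singleton, List.singleton_append, pvPush_cons]
      simp [pyGeOpt]]
  rw [pvPull_char, pvPush_char, List.reverse_reverse]
  have hub1 := pvMax_le f (f 1) (List.range' 2 k)
  have hub2 := pvMax_le f (f (k + 1)) ((List.range' 1 k).reverse)
  have hub1' : ∀ j, 1 ≤ j → j ≤ k + 1 → f j ≤ pvMax f (f 1) (List.range' 2 k) := by
    intro j h1 h2
    rcases Nat.lt_or_ge j 2 with hj | hj
    · have : j = 1 := by omega
      subst this; exact hub1.1
    · exact hub1.2 j (List.mem_range'_1.mpr ⟨by omega, by omega⟩)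
  have hub2' : ∀ j, 1 ≤ j → j ≤ k + 1 → f j ≤ pvMax f (f (k + 1)) ((List.range' 1 k).reverse) := by
    intro j h1 h2
    rcases Nat.lt_or_ge j (k + 1) with hj | hj
    · exact hub2.2 j (List.mem_reverse.2 (List.mem_range'_1.mpr ⟨by omega, by omega⟩))
    · have : j = k + 1 := by omega
      subst this; exact hub2.1
  have hM12 : pvMax f (f (k + 1)) ((List.range' 1 k).reverse) = pvMax f (f 1) (List.range' 2 k) := by
    apply le_antisymm
    · rcases pvMax_attained f (f (k + 1)) ((List.range' 1 k).reverse) with h | ⟨i, hi, hv⟩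
      · rw [h]; exact hub1' (k + 1) (by omega) (by omega)
      · have hm := List.mem_range'_1.1 (List.mem_reverse.1 hi)
        rw [hv]; exact hub1' i (by omega) (by omega)
    · rcases pvMax_attained f (f 1) (List.range' 2 k) with h | ⟨i, hi, hv⟩
      · rw [h]; exact hub2' 1 (by omega) (by omega)
      · have hm := List.mem_range'_1.1 hi
        rw [hv]; exact hub2' i (by omega) (by omega)
  rw [hM12]
  refine Prod.ext rfl ?_
  simp only
  by_cases hf1 : f 1 = pvMax f (f 1) (List.range' 2 k)
  · rw [if_neg (by omega)]
    cases k with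
    | zero => simp [List.range']
    | succ k' =>
        rw [show List.range' 1 (k' + 1) = 1 :: List.range' 2 k' from List.range'_succ,
          List.find?_cons_of_pos (p := fun i => decide (f i = pvMax f (f 1) (List.range' 2 (k' + 1)))) (by simpa using hf1)]
  · have hcase : f 1 < pvMax f (f 1) (List.range' 2 k) :=
      lt_of_le_of_ne hub1.1 hf1
    rw [if_pos hcase]
    cases k with
    | zero =>
        exfalso; exact hf1 (by simp [pvMax, List.range'])
    | succ k' =>
        set M := pvMax f (f 1) (List.range' 2 (k' + 1)) with hMdef
        have e3 : List.range' 2 (k' + 1) = List.range' 2 k' ++ [k' + 2] := by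
          simpa [Nat.add_comm] using (List.range'_concat (step := 1) (s := 2) (n := k'))
        have e4 : List.range' 1 (k' + 1) = 1 :: List.range' 2 k' := List.range'_succ
        have hex : ∃ i ∈ List.range' 2 (k' + 1), f i = M := by
          rcases pvMax_attained f (f 1) (List.range' 2 (k' + 1)) with h | ⟨i, hi, hv⟩
          · exact absurd h.symm hf1
          · exact ⟨i, hi, hv.symm⟩
        rw [e4, List.find?_cons_of_neg (p := fun i => decide (f i = M)) (by simpa using hf1),
          e3, List.find?_append]
        cases h2 : List.find? (fun i => decide (f i = M)) (List.range' 2 k') with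
        | some j => simp
        | none =>
            have hlast : f (k' + 2) = M := by
              rcases hex with ⟨i, hi, hv⟩
              rw [e3] at hi
              rcases List.mem_append.1 hi with hi | hi
              · exact absurd (by simpa using hv)
                  ((List.find?_eq_none.1 h2) i hi)
              · have : i = k' + 2 := by simpa using hi
                subst this; exact hv
            rw [List.find?_cons_of_pos (p := fun i => decide (f i = M)) (by simpa using hlast)]
            simp only [Option.none_or, Option.getD_some]

theorem getD_append_self {α : Type} (X : List α) (v d : α) :
    (X ++ [v]).getD X.length d = v := by
  rw [List.getD_eq_getElem?_getD, List.getElem?_append_right (Nat.le_refl _)]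
  simp

theorem pvPull_isSome (f : Nat → Int) (k : Nat) :
    ∃ v s, pvPull f (List.range' 1 (k + 1)) (none, 0) = (some v, s) := by
  rw [List.range'_succ, pvPull_cons]
  simp only [pyLtNegInf, if_true]
  rw [pvPull_char]
  exact ⟨_, _, rfl⟩

-- ---- pvTab basics ----

theorem pvTab_len (p : List Int) (c : Int) (N : Nat) :
    (pvTab p c N).1.length = N + 1 ∧ (pvTab p c N).2.length = N + 1 := by
  induction N with
  | zero => simp [pvTab]
  | succ t ih => simp [pvTab, ih.1, ih.2]

theorem pvTab_getD_stable (p : List Int) (c : Int) :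
    ∀ (N k : Nat), k ≤ N →
      (pvTab p c N).1.getD k 0 = (pvTab p c k).1.getD k 0 ∧
      (pvTab p c N).2.getD k 0 = (pvTab p c k).2.getD k 0 := by
  intro N
  induction N with
  | zero => intro k hk; interval_cases k; exact ⟨rfl, rfl⟩
  | succ t ih =>
      intro k hk
      rcases Nat.lt_or_ge k (t + 1) with h | h
      · have h1 : k < (pvTab p c t).1.length := by rw [(pvTab_len p c t).1]; omega
        have h2 : k < (pvTab p c t).2.length := by rw [(pvTab_len p c t).2]; omega
        constructor
        · rw [show (pvTab p c (t+1)).1 = (pvTab p c t).1 ++ [_] from rfl,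
             List.getD_append _ _ _ _ h1]
          exact (ih k (by omega)).1
        · rw [show (pvTab p c (t+1)).2 = (pvTab p c t).2 ++ [_] from rfl,
             List.getD_append _ _ _ _ h2]
          exact (ih k (by omega)).2
      · have : k = t + 1 := by omega
        subst this; exact ⟨rfl, rfl⟩

-- ---- A-side ----

-- threading the in-place writes S[j] = i through A's inner loop
theorem pvThreadS (f : Nat → Int) (J : Nat) :
    ∀ (l : List Nat) (q : Option Int) (s : Int) (S : List Int),
      l.foldl (fun (qS : Option Int × List Int) k =>
          if pyLtNegInf qS.1 (f k) then (some (f k), qS.2.set J (k : Int)) else qS)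
        (q, S.set J s)
      = ((pvPull f l (q, s)).1, S.set J (pvPull f l (q, s)).2) := by
  intro l
  induction l with
  | nil => intro q s S; rfl
  | cons a l ih =>
      intro q s S
      rw [List.foldl_cons, pvPull_cons]
      by_cases h : pyLtNegInf q (f a)
      · simp only [h, if_true, List.set_set]
        exact ih (some (f a)) (a : Int) S
      · simp only [h, Bool.false_eq_true, if_false]
        exact ih q s S

theorem pad_set {α : Type} (X : List α) (k : Nat) (a v : α) :
    (X ++ List.replicate (k + 1) a).set X.length v = X ++ v :: List.replicate k a := by
  rw [show X.length = X.length + 0 from rfl, List.set_append_right _ _ (by omega)]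
  simp [List.replicate_succ]

-- A's inner loop over the Int range, re-indexed over the Nat range' 1 t
theorem inner_to_nat (p : List Int) (c : Int) (X Y : List Int) (t : Nat) :
    (PySem.List.pyRange 1 ((t : Int) + 1) 1).foldl
      (fun (qS : Option Int × List Int) i =>
        if pyLtNegInf qS.1 (PySem.List.pyGetD p i 0 + PySem.List.pyGetD X ((t : Int) - i) 0 - c)
        then (some (PySem.List.pyGetD p i 0 + PySem.List.pyGetD X ((t : Int) - i) 0 - c),
              PySem.List.pySetD qS.2 (t : Int) i)
        else qS) (none, Y)
    = (List.range' 1 t).foldl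
      (fun (qS : Option Int × List Int) (i : Nat) =>
        if pyLtNegInf qS.1 (PySem.List.pyGetD p (i : Int) 0 + PySem.List.pyGetD X ((t : Int) - (i : Int)) 0 - c)
        then (some (PySem.List.pyGetD p (i : Int) 0 + PySem.List.pyGetD X ((t : Int) - (i : Int)) 0 - c),
              qS.2.set t (i : Int))
        else qS) (none, Y) := by
  rw [PySem.List.pyRange_one, List.range'_eq_map_range, List.foldl_map, List.foldl_map]
  have hT : (((t : Int) + 1) - 1).toNat = t := by omega
  rw [hT]
  congr 1
  funext qS k
  have hcast : (1 : Int) + (k : Int) = ((1 + k : Nat) : Int) := by push_cast; ring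
  rw [hcast]
  simp [PySem.List.pySetD_natCast]

-- A's outer loop invariant: after iterations j = 1..m the state is the table padded with zeros
theorem A_outer (p : List Int) (c : Int) (N : Nat) :
    ∀ (m : Nat), m ≤ N →
      (PySem.List.pyRange 1 ((m : Int) + 1) 1).foldl
        (fun (RS : List Int × List Int) j =>
          let inner := (PySem.List.pyRange 1 (j + 1) 1).foldl
            (fun (qS : Option Int × List Int) i =>
              if pyLtNegInf qS.1 (PySem.List.pyGetD p i 0 + PySem.List.pyGetD RS.1 (j - i) 0 - c)
              then (some (PySem.List.pyGetD p i 0 + PySem.List.pyGetD RS.1 (j - i) 0 - c),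
                    PySem.List.pySetD qS.2 j i)
              else qS)
            (none, RS.2)
          (PySem.List.pySetD RS.1 j (inner.1.getD 0), inner.2))
        (List.replicate (N + 1) 0, List.replicate (N + 1) 0)
      = ((pvTab p c m).1 ++ List.replicate (N - m) 0,
         (pvTab p c m).2 ++ List.replicate (N - m) 0) := by
  intro m
  induction m with
  | zero =>
      intro _
      rw [PySem.List.pyRange_one_eq_nil (by omega)]
      simp [pvTab, List.replicate_succ]
  | succ m ih =>
      intro hm
      have hsplit : PySem.List.pyRange 1 (((m + 1 : Nat) : Int) + 1) 1
          = PySem.List.pyRange 1 ((m : Int) + 1) 1 ++ [(m : Int) + 1] := by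
        have h := PySem.List.pyRange_one_succ_right (a := 1) (b := (m : Int) + 1) (by omega)
        convert h using 2
      rw [hsplit, List.foldl_append, ih (by omega)]
      simp only [List.foldl_cons, List.foldl_nil]
      have hj : (m : Int) + 1 = ((m + 1 : Nat) : Int) := by push_cast; ring
      rw [hj]
      set X := (pvTab p c m).1 ++ List.replicate (N - m) 0 with hX
      set Y := (pvTab p c m).2 ++ List.replicate (N - m) 0 with hY
      rw [inner_to_nat p c X Y (m + 1)]
      have hXlen := (pvTab_len p c m).1
      have hYlen := (pvTab_len p c m).2
      have hNm : N - m = (N - (m + 1)) + 1 := by omega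
      have hYset : Y = Y.set (m + 1) (0 : Int) := by
        rw [hY, hNm, ← hYlen, pad_set]
        simp [List.replicate_succ]
      rw [show ((none : Option Int), Y) = (none, Y.set (m + 1) (0 : Int)) from by rw [← hYset]]
      rw [pvThreadS (fun i : Nat => PySem.List.pyGetD p (i : Int) 0 + PySem.List.pyGetD X (((m + 1 : Nat) : Int) - (i : Int)) 0 - c) (m + 1) (List.range' 1 (m + 1)) none 0 Y]
      have hcong : pvPull (fun i : Nat => PySem.List.pyGetD p (i : Int) 0 + PySem.List.pyGetD X (((m + 1 : Nat) : Int) - (i : Int)) 0 - c) (List.range' 1 (m + 1)) (none, 0)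
          = pvPull (pvCand p c (pvTab p c m).1 (m + 1)) (List.range' 1 (m + 1)) (none, 0) := by
        apply pvPull_congr
        intro i hi
        have hmem := List.mem_range'_1.1 hi
        unfold pvCand
        have hidx : ((m + 1 : Nat) : Int) - (i : Int) = ((m + 1 - i : Nat) : Int) := by
          push_cast; omega
        simp only [hidx, PySem.List.pyGetD_natCast, hX]
        rw [List.getD_append _ _ _ _ (by omega)]
      rw [hcong]
      set qs := pvPull (pvCand p c (pvTab p c m).1 (m + 1)) (List.range' 1 (m + 1)) (none, 0) with hqs
      simp only [PySem.List.pySetD_natCast]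
      have hTab : pvTab p c (m + 1) = ((pvTab p c m).1 ++ [qs.1.getD 0], (pvTab p c m).2 ++ [qs.2]) := rfl
      rw [hTab]
      refine Prod.ext ?_ ?_
      · simp only
        rw [hX, hNm, ← hXlen, pad_set]
        simp
      · simp only
        rw [hY, hNm, ← hYlen, pad_set]
        simp

theorem A_char (p : List Int) (n c : Int) (hn : 0 ≤ n) :
    Extended_Bottom_Up_Cut_Rod p n c = pvTab p c n.toNat := by
  unfold Extended_Bottom_Up_Cut_Rod
  have h1 : (n + 1).toNat = n.toNat + 1 := by omega
  have h2 : n + 1 = ((n.toNat : Int)) + 1 := by omega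
  rw [h1, h2, A_outer p c n.toNat n.toNat (Nat.le_refl _)]
  simp

-- ---- B-side ----

theorem pvCellIdx_complete (t : Nat) (ht : 1 ≤ t) :
    pvCellIdx t t = (List.range' 1 t).reverse := by
  rw [pvCellIdx, Nat.min_self, List.reverse_range']
  apply List.map_congr_left
  intro k hk
  rw [List.mem_range] at hk
  omega

theorem B_complete (p : List Int) (c : Int) (N t : Nat) (ht : 1 ≤ t) (htN : t ≤ N) :
    pvPush (pvCand p c (pvTab p c N).1 t) (pvCellIdx t t) (none, 0)
      = (some ((pvTab p c N).1.getD t 0), (pvTab p c N).2.getD t 0) := by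
  obtain ⟨k, rfl⟩ : ∃ k, t = k + 1 := ⟨t - 1, by omega⟩
  rw [pvCellIdx_complete _ ht, pvStar]
  have hcong : pvPull (pvCand p c (pvTab p c N).1 (k + 1)) (List.range' 1 (k + 1)) (none, 0)
      = pvPull (pvCand p c (pvTab p c k).1 (k + 1)) (List.range' 1 (k + 1)) (none, 0) := by
    apply pvPull_congr
    intro i hi
    have hm := List.mem_range'_1.1 hi
    unfold pvCand
    have hidx : ((k + 1 : Nat) : Int) - (i : Int) = ((k + 1 - i : Nat) : Int) := by
      push_cast; omega
    simp only [hidx, PySem.List.pyGetD_natCast,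
      (pvTab_getD_stable p c N (k + 1 - i) (by omega)).1,
      (pvTab_getD_stable p c k (k + 1 - i) (by omega)).1]
  rw [hcong]
  obtain ⟨v, sv, hvs⟩ := pvPull_isSome (pvCand p c (pvTab p c k).1 (k + 1)) k
  have hT : pvTab p c (k + 1)
      = ((pvTab p c k).1 ++ [(pvPull (pvCand p c (pvTab p c k).1 (k + 1)) (List.range' 1 (k + 1)) (none, 0)).1.getD 0],
         (pvTab p c k).2 ++ [(pvPull (pvCand p c (pvTab p c k).1 (k + 1)) (List.range' 1 (k + 1)) (none, 0)).2]) := rfl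
  have hlen1 := (pvTab_len p c k).1
  have hlen2 := (pvTab_len p c k).2
  have hR : (pvTab p c N).1.getD (k + 1) 0 = v := by
    rw [(pvTab_getD_stable p c N (k + 1) htN).1, hT]
    simp only
    rw [hvs]
    simp only [Option.getD_some]
    rw [← hlen1, getD_append_self]
  have hS : (pvTab p c N).2.getD (k + 1) 0 = sv := by
    rw [(pvTab_getD_stable p c N (k + 1) htN).2, hT]
    simp only
    rw [hvs]
    rw [← hlen2, getD_append_self]
  rw [hvs, hR, hS]

-- B's outer loop invariant
theorem map_range_set {α : Type} (g : Nat → α) (n t : Nat) (v : α) (ht : t < n) :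
    (List.map g (List.range n)).set t v
      = List.map (fun x => if x = t then v else g x) (List.range n) := by
  apply List.ext_getElem
  · simp
  · intro i h1 h2
    simp only [List.getElem_set, List.getElem_map, List.getElem_range]
    rcases eq_or_ne t i with h | h
    · subst h; simp
    · simp [h, Ne.symm h]

-- B's inner loop, cell by cell: iterations i = 1..k update exactly the cells m+1..m+k once
theorem B_inner_pointwise (g : Nat → Int) (m N : Nat) (A : Nat → Option Int) (B : Nat → Int) :
    ∀ k, k ≤ N - m →
      (List.range' 1 k).foldl
        (fun (RS : List (Option Int) × List Int) (i : Nat) =>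
          if pyGeOpt (g i) (PySem.List.pyGetD RS.1 ((m + i : Nat) : Int) none)
          then (PySem.List.pySetD RS.1 ((m + i : Nat) : Int) (some (g i)),
                PySem.List.pySetD RS.2 ((m + i : Nat) : Int) ((i : Nat) : Int))
          else RS)
        ((List.range (N + 1)).map A, (List.range (N + 1)).map B)
      = ((List.range (N + 1)).map (fun t =>
            if (m + 1 ≤ t ∧ t ≤ m + k) ∧ pyGeOpt (g (t - m)) (A t) = true
            then some (g (t - m)) else A t),
         (List.range (N + 1)).map (fun t =>
            if (m + 1 ≤ t ∧ t ≤ m + k) ∧ pyGeOpt (g (t - m)) (A t) = true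
            then ((t - m : Nat) : Int) else B t)) := by
  intro k
  induction k with
  | zero =>
      intro _
      simp
  | succ k ih =>
      intro hk
      have e : List.range' 1 (k + 1) = List.range' 1 k ++ [k + 1] := by
        simpa [Nat.add_comm] using (List.range'_concat (step := 1) (s := 1) (n := k))
      rw [e, List.foldl_append, ih (by omega)]
      simp only [List.foldl_cons, List.foldl_nil]
      have hread : PySem.List.pyGetD ((List.range (N + 1)).map (fun t =>
            if (m + 1 ≤ t ∧ t ≤ m + k) ∧ pyGeOpt (g (t - m)) (A t) = true
            then some (g (t - m)) else A t)) ((m + (k + 1) : Nat) : Int) none = A (m + (k + 1)) := by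
        rw [PySem.List.pyGetD_natCast]
        rw [List.getD_eq_getElem _ _ (by simp; omega)]
        simp only [List.getElem_map, List.getElem_range]
        rw [if_neg (fun h => absurd h.1.2 (by omega))]
      rw [hread]
      have hsub : m + (k + 1) - m = k + 1 := by omega
      by_cases hacc : pyGeOpt (g (k + 1)) (A (m + (k + 1))) = true
      · rw [if_pos hacc]
        simp only [PySem.List.pySetD_natCast]
        rw [map_range_set _ _ _ _ (by omega), map_range_set _ _ _ _ (by omega)]
        refine Prod.ext ?_ ?_ <;> · simp only
                                    apply List.map_congr_left
                                    intro x hx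
                                    have hxN := List.mem_range.1 hx
                                    rcases eq_or_ne x (m + (k + 1)) with hxe | hxe
                                    · subst hxe
                                      rw [if_pos rfl, if_pos (by exact ⟨⟨by omega, by omega⟩, by rw [hsub]; exact hacc⟩)]
                                      rw [hsub]
                                    · rw [if_neg hxe]
                                      by_cases hcnd : (m + 1 ≤ x ∧ x ≤ m + k) ∧ pyGeOpt (g (x - m)) (A x) = true
                                      · rw [if_pos hcnd, if_pos ⟨⟨hcnd.1.1, by omega⟩, hcnd.2⟩]
                                      · rw [if_neg hcnd, if_neg (fun h => hcnd ⟨⟨h.1.1, by omega⟩, h.2⟩)]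
      · rw [if_neg hacc]
        refine Prod.ext ?_ ?_ <;> · simp only
                                    apply List.map_congr_left
                                    intro x hx
                                    have hxN := List.mem_range.1 hx
                                    rcases eq_or_ne x (m + (k + 1)) with hxe | hxe
                                    · subst hxe
                                      rw [if_neg (fun h => absurd h.1.2 (by omega)),
                                        if_neg (fun h => hacc (by simpa [hsub] using h.2))]
                                    · by_cases hcnd : (m + 1 ≤ x ∧ x ≤ m + k) ∧ pyGeOpt (g (x - m)) (A x) = true
                                      · rw [if_pos hcnd, if_pos ⟨⟨hcnd.1.1, by omega⟩, hcnd.2⟩]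
                                      · rw [if_neg hcnd, if_neg (fun h => hcnd ⟨⟨h.1.1, by omega⟩, h.2⟩)]

-- B's inner loop over the Int range, re-indexed over the Nat range' 1 (N - m)
theorem innerB_to_nat (p : List Int) (bm : Int) (m N : Nat) (hm : m ≤ N)
    (st : List (Option Int) × List Int) :
    (PySem.List.pyRange 1 ((N : Int) - (m : Int) + 1) 1).foldl
      (fun (RS' : List (Option Int) × List Int) i =>
        if pyGeOpt (bm + PySem.List.pyGetD p i 0) (PySem.List.pyGetD RS'.1 ((m : Int) + i) none)
        then (PySem.List.pySetD RS'.1 ((m : Int) + i) (some (bm + PySem.List.pyGetD p i 0)),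
              PySem.List.pySetD RS'.2 ((m : Int) + i) i)
        else RS') st
    = (List.range' 1 (N - m)).foldl
        (fun (RS' : List (Option Int) × List Int) (i : Nat) =>
          if pyGeOpt (bm + PySem.List.pyGetD p (i : Int) 0) (PySem.List.pyGetD RS'.1 ((m + i : Nat) : Int) none)
          then (PySem.List.pySetD RS'.1 ((m + i : Nat) : Int) (some (bm + PySem.List.pyGetD p (i : Int) 0)),
                PySem.List.pySetD RS'.2 ((m + i : Nat) : Int) ((i : Nat) : Int))
          else RS') st := by
  rw [PySem.List.pyRange_one, List.range'_eq_map_range, List.foldl_map, List.foldl_map]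
  have hT : (((N : Int) - (m : Int) + 1) - 1).toNat = N - m := by omega
  rw [hT]
  congr 1

theorem B_outer (p : List Int) (c : Int) (N : Nat) :
    ∀ (m : Nat), m ≤ N →
      (PySem.List.pyRange 0 (m : Int) 1).foldl
        (fun (RS : List (Option Int) × List Int) j =>
          (PySem.List.pyRange 1 ((N : Int) - j + 1) 1).foldl
            (fun (RS' : List (Option Int) × List Int) i =>
              if pyGeOpt ((PySem.List.pyGetD RS.1 j none).getD 0 - c + PySem.List.pyGetD p i 0)
                   (PySem.List.pyGetD RS'.1 (j + i) none)
              then (PySem.List.pySetD RS'.1 (j + i)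
                      (some ((PySem.List.pyGetD RS.1 j none).getD 0 - c + PySem.List.pyGetD p i 0)),
                    PySem.List.pySetD RS'.2 (j + i) i)
              else RS')
            RS)
        (PySem.List.pySetD (List.replicate (N + 1) none) 0 (some 0), List.replicate (N + 1) 0)
      = (pvBR p c N m, pvBS p c N m) := by
  intro m
  induction m with
  | zero =>
      intro _
      rw [PySem.List.pyRange_one_eq_nil (by omega)]
      simp only [List.foldl_nil]
      refine Prod.ext ?_ ?_
      · simp only
        rw [PySem.List.pySetD_of_nonneg _ _ (le_refl 0)]
        apply List.ext_getElem
        · simp [pvBR]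
        · intro i h1 h2
          simp only [Int.toNat_zero, List.getElem_set, List.getElem_replicate, pvBR,
            List.getElem_map, List.getElem_range]
          rcases eq_or_ne i 0 with h | h
          · subst h; simp
          · simp [h, Ne.symm h, pvCellIdx, pvPush]
      · simp only
        apply List.ext_getElem
        · simp [pvBS]
        · intro i h1 h2
          simp [pvBS, pvCellIdx, pvPush]
  | succ m ih =>
      intro hm
      have hsplit : PySem.List.pyRange 0 ((m + 1 : Nat) : Int) 1
          = PySem.List.pyRange 0 (m : Int) 1 ++ [(m : Int)] := by
        have h := PySem.List.pyRange_one_succ_right (a := 0) (b := (m : Int)) (by omega)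
        convert h using 2
      rw [hsplit, List.foldl_append, ih (by omega)]
      simp only [List.foldl_cons, List.foldl_nil]
      -- the value of the solved source cell m
      have hbase : PySem.List.pyGetD (pvBR p c N m) ((m : Nat) : Int) none
          = some ((pvTab p c N).1.getD m 0) := by
        rw [PySem.List.pyGetD_natCast, pvBR,
          List.getD_eq_getElem _ _ (by simp; omega)]
        simp only [List.getElem_map, List.getElem_range]
        rcases eq_or_ne m 0 with h | h
        · subst h
          rw [if_pos rfl, (pvTab_getD_stable p c N 0 (by omega)).1]
          rfl
        · rw [if_neg h,
            show pvCellIdx m m = pvCellIdx m m from rfl,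
            B_complete p c N m (by omega) (by omega)]
      rw [hbase]
      simp only [Option.getD_some]
      rw [innerB_to_nat p ((pvTab p c N).1.getD m 0 - c) m N (by omega)]
      rw [show (pvBR p c N m, pvBS p c N m)
            = ((List.range (N + 1)).map (fun t =>
                 if t = 0 then some 0
                 else (pvPush (pvCand p c (pvTab p c N).1 t) (pvCellIdx t m) (none, 0)).1),
               (List.range (N + 1)).map (fun t =>
                 (pvPush (pvCand p c (pvTab p c N).1 t) (pvCellIdx t m) (none, 0)).2)) from rfl]
      rw [B_inner_pointwise (fun i => (pvTab p c N).1.getD m 0 - c + PySem.List.pyGetD p (i : Int) 0)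
            m N _ _ (N - m) (le_refl _)]
      -- cellwise comparison with the state after m + 1 sources
      have hval : ∀ t, m + 1 ≤ t → t ≤ N →
          pvCand p c (pvTab p c N).1 t (t - m)
            = (pvTab p c N).1.getD m 0 - c + PySem.List.pyGetD p ((t - m : Nat) : Int) 0 := by
        intro t h1 h2
        unfold pvCand
        have hidx : ((t : Nat) : Int) - ((t - m : Nat) : Int) = ((m : Nat) : Int) := by
          push_cast; omega
        simp only [hidx, PySem.List.pyGetD_natCast]
        ring
      have hIdxSplit : ∀ t, m + 1 ≤ t →
          pvCellIdx t (m + 1) = pvCellIdx t m ++ [t - m] := by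
        intro t h1
        rw [pvCellIdx, pvCellIdx, show min m t = m from by omega,
          show min (m + 1) t = m + 1 from by omega, List.range_succ]
        simp
      refine Prod.ext ?_ ?_
      · simp only [pvBR]
        apply List.map_congr_left
        intro t ht
        have htN := List.mem_range.1 ht
        rcases eq_or_ne t 0 with h0 | h0
        · subst h0
          rw [if_neg (fun h => absurd h.1.1 (by omega)), if_pos rfl, if_pos rfl]
        · rcases Nat.lt_or_ge t (m + 1) with hlt | hge
          · rw [if_neg (fun h => absurd h.1.1 (by omega)), if_neg h0, if_neg h0,
              show pvCellIdx t (m + 1) = pvCellIdx t m from by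
                rw [pvCellIdx, pvCellIdx, show min m t = t from by omega,
                  show min (m + 1) t = t from by omega]]
          · rw [if_neg h0, if_neg h0, hIdxSplit t hge, pvPush_append, pvPush_cons]
            rw [hval t hge (by omega)]
            by_cases hacc : pyGeOpt ((pvTab p c N).1.getD m 0 - c + PySem.List.pyGetD p ((t - m : Nat) : Int) 0)
                ((pvPush (pvCand p c (pvTab p c N).1 t) (pvCellIdx t m) (none, 0)).1) = true
            · rw [if_pos ⟨⟨hge, by omega⟩, hacc⟩, if_pos hacc]
              rfl
            · rw [if_neg (fun h => hacc h.2), if_neg hacc]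
              rfl
      · simp only [pvBS, pvBR]
        apply List.map_congr_left
        intro t ht
        have htN := List.mem_range.1 ht
        rcases Nat.lt_or_ge t (m + 1) with hlt | hge
        · rw [if_neg (fun h => absurd h.1.1 (by omega)),
            show pvCellIdx t (m + 1) = pvCellIdx t m from by
              rw [pvCellIdx, pvCellIdx, show min m t = min (m + 1) t from by omega]]
        · have h0 : t ≠ 0 := by omega
          rw [if_neg h0, hIdxSplit t hge, pvPush_append, pvPush_cons]
          rw [hval t hge (by omega)]
          by_cases hacc : pyGeOpt ((pvTab p c N).1.getD m 0 - c + PySem.List.pyGetD p ((t - m : Nat) : Int) 0)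
              ((pvPush (pvCand p c (pvTab p c N).1 t) (pvCellIdx t m) (none, 0)).1) = true
          · rw [if_pos ⟨⟨hge, by omega⟩, hacc⟩, if_pos hacc]
            rfl
          · rw [if_neg (fun h => hacc h.2), if_neg hacc]
            rfl

theorem B_final (p : List Int) (c : Int) (N : Nat) :
    ((pvBR p c N N).map (fun o => o.getD 0), pvBS p c N N) = pvTab p c N := by
  have hlen1 := (pvTab_len p c N).1
  have hlen2 := (pvTab_len p c N).2
  refine Prod.ext ?_ ?_
  · simp only
    apply List.ext_getElem
    · simp [pvBR, hlen1]
    · intro t h1 h2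
      have htN : t < N + 1 := by simpa [pvBR] using h1
      rw [← List.getD_eq_getElem (pvTab p c N).1 0 h2]
      simp only [pvBR, List.getElem_map, List.getElem_range]
      by_cases ht : t = 0
      · subst ht
        simp only [if_pos rfl]
        rw [(pvTab_getD_stable p c N 0 (by omega)).1]
        rfl
      · rw [if_neg ht,
          show pvCellIdx t N = pvCellIdx t t from by
            rw [pvCellIdx, pvCellIdx, Nat.min_self, show min N t = t from by omega],
          B_complete p c N t (by omega) (by omega)]
        simp
  · simp only
    apply List.ext_getElem
    · simp [pvBS, hlen2]
    · intro t h1 h2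
      have htN : t < N + 1 := by simpa [pvBS] using h1
      rw [← List.getD_eq_getElem (pvTab p c N).2 0 h2]
      simp only [pvBS, List.getElem_map, List.getElem_range]
      by_cases ht : t = 0
      · subst ht
        rw [(pvTab_getD_stable p c N 0 (by omega)).2]
        simp [pvCellIdx, pvPush, pvTab]
      · rw [show pvCellIdx t N = pvCellIdx t t from by
            rw [pvCellIdx, pvCellIdx, Nat.min_self, show min N t = t from by omega],
          B_complete p c N t (by omega) (by omega)]

theorem B_char_nat (p : List Int) (c : Int) (N : Nat) :
    Extended_Bottom_Up_Cut_Rod_alt p (N : Int) c = pvTab p c N := by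
  unfold Extended_Bottom_Up_Cut_Rod_alt
  dsimp only
  rw [if_pos (by positivity : (0 : Int) ≤ (N : Int)),
    show ((N : Int) + 1).toNat = N + 1 from by omega,
    B_outer p c N N (Nat.le_refl _)]
  exact B_final p c N

theorem B_char (p : List Int) (n c : Int) (hn : 0 ≤ n) :
    Extended_Bottom_Up_Cut_Rod_alt p n c = pvTab p c n.toNat := by
  obtain ⟨N, rfl⟩ : ∃ N : Nat, n = (N : Int) := ⟨n.toNat, by omega⟩
  rw [Int.toNat_natCast]
  exact B_char_nat p c N

-- ===== VERDICT (by name: the statement is the Claim_ definition above) =====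
theorem Extended_Bottom_Up_Cut_Rod_spec : Claim_equal_Extended_Bottom_Up_Cut_Rod := by
  intro p n c _ _
  unfold Spec_Extended_Bottom_Up_Cut_Rod
  by_cases hn : 0 ≤ n
  · rw [A_char p n c hn, B_char p n c hn]
  · have h0 : (n + 1).toNat = 0 := by omega
    unfold Extended_Bottom_Up_Cut_Rod Extended_Bottom_Up_Cut_Rod_alt
    rw [h0, PySem.List.pyRange_one_eq_nil (by omega : n + 1 ≤ 1),
      PySem.List.pyRange_one_eq_nil (by omega : n ≤ 0)]
    simp [hn]
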